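-- pv_equiv track=rewrite | github.com/PerryXDeng/aoc_2024 | pythonProject/day_02/day_02.py | verify_with_one_level_of_tolerance_dp
-- ===== SOURCE A (Python) =====
-- def verify_with_one_level_of_tolerance_dp(values, previous_value, previous_difference, remaining_tolerance, debug=False):
--   if remaining_tolerance < 0:
--     return False
--   if len(values) == 0:
--     return True
--   difference = values[0] - previous_value
--   # this is only true when the current index has the same sign and the difference is within the bound
--   # this accounts for having no previous difference to compare with, by setting previous_difference to 0
--   current_index_verified = difference * previous_difference >= 0 and 1 <= abs(difference) <= 3
--   # if the current index is verified, then we can move on to the next index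
--   # if the current index is not verified, then we try to skip the current one but reduce one level of tolerance
--   if current_index_verified:
--     if verify_with_one_level_of_tolerance_dp(values[1:], values[0], difference, remaining_tolerance):
--       return True
--   return verify_with_one_level_of_tolerance_dp(values[1:], previous_value, previous_difference, remaining_tolerance - 1)
-- ===== SOURCE B (Python) =====
-- def verify_with_one_level_of_tolerance_dp(values, previous_value, previous_difference, remaining_tolerance, debug=False):
--   # Memoized DP over (index, previous_value, sign of previous difference, clamped tolerance);
--   # no list slicing, each state computed once.
--   n = len(values)
--   memo = {}
--   def go(i, pv, sd, t):
--     if t < 0: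
--       return False
--     if i == n:
--       return True
--     tc = t if t < n - i else n - i  # t >= n - i always succeeds by skipping the rest
--     key = (i, pv, sd, tc)
--     if key in memo:
--       return memo[key]
--     d = values[i] - pv
--     ok = d * sd >= 0 and 1 <= abs(d) <= 3
--     res = (ok and go(i + 1, values[i], (d > 0) - (d < 0), tc)) or go(i + 1, pv, sd, tc - 1)
--     memo[key] = res
--     return res
--   sd0 = (previous_difference > 0) - (previous_difference < 0)
--   return go(0, previous_value, sd0, remaining_tolerance)
-- ===== Notes on version B (the rewrite author's own statement) =====
-- stated objective: faster
-- what changed: Replaces A's branching recursion over list slices by a memoized DP over states (index, previous value, sign of previous difference, tolerance clamped to the remaining length), so each state is computed once and no slices are copied.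
import Mathlib
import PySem

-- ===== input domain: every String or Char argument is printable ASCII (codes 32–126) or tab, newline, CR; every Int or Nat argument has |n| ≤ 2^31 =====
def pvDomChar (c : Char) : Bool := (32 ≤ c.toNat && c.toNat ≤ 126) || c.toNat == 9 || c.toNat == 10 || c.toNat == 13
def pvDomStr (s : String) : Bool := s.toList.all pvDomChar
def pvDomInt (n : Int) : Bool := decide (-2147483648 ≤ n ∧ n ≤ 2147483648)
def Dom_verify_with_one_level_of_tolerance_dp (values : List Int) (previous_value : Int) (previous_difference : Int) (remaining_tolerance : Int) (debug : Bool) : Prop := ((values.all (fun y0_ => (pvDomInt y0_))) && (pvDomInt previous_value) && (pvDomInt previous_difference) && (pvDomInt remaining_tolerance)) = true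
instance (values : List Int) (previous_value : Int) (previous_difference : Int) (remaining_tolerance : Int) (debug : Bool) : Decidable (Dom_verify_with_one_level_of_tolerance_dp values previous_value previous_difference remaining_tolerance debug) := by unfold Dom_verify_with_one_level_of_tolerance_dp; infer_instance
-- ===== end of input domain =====

-- B replaces A's exponential branching with slicing by a memoized DP over
-- (index, previous value, sign of previous difference, clamped tolerance): an asymptotically
-- different algorithm, same return value on every input.

-- ===== PORT A =====
-- literal transliteration of A: recursive calls on values[1:], debug defaults to False in them
def verify_with_one_level_of_tolerance_dp (values : List Int) (previous_value : Int) (previous_difference : Int) (remaining_tolerance : Int) (debug : Bool) : Bool :=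
  if remaining_tolerance < 0 then false
  else
    match values with
    | [] => true
    | v :: rest =>
      let difference := v - previous_value
      let current_index_verified := decide (difference * previous_difference ≥ 0) &&
        (decide (1 ≤ |difference|) && decide (|difference| ≤ 3))
      if current_index_verified then
        if verify_with_one_level_of_tolerance_dp rest v difference remaining_tolerance false then true
        else verify_with_one_level_of_tolerance_dp rest previous_value previous_difference (remaining_tolerance - 1) false
      else verify_with_one_level_of_tolerance_dp rest previous_value previous_difference (remaining_tolerance - 1) false
termination_by values.length
decreasing_by all_goals simp

-- ===== PORT B =====
-- (d > 0) - (d < 0) from Source B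
def pvSgn (d : Int) : Int := (if 0 < d then 1 else 0) - (if d < 0 then 1 else 0)

-- the memoized recursion go(i, pv, sd, t) of Source B; the memo dict is threaded through explicitly
def pvBGo (values : List Int) (i : Nat) (pv : Int) (sd : Int) (t : Int)
    (memo : PySem.Dict (Nat × Int × Int × Int) Bool) :
    Bool × PySem.Dict (Nat × Int × Int × Int) Bool :=
  if t < 0 then (false, memo)
  else if h : i < values.length then
    let tc : Int := if t < (values.length : Int) - i then t else (values.length : Int) - i
    match memo.get? (i, pv, sd, tc) with
    | some b => (b, memo)
    | none =>
      let d := values[i] - pv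
      let ok := decide (d * sd ≥ 0) && (decide (1 ≤ |d|) && decide (|d| ≤ 3))
      let r1 := if ok then pvBGo values (i + 1) values[i] (pvSgn d) tc memo else (false, memo)
      let r2 := if r1.1 then (true, r1.2) else pvBGo values (i + 1) pv sd (tc - 1) r1.2
      (r2.1, r2.2.insert (i, pv, sd, tc) r2.1)
  else (true, memo)
termination_by values.length - i
decreasing_by all_goals omega

def verify_with_one_level_of_tolerance_dp_alt (values : List Int) (previous_value : Int) (previous_difference : Int) (remaining_tolerance : Int) (debug : Bool) : Bool :=
  (pvBGo values 0 previous_value (pvSgn previous_difference) remaining_tolerance PySem.Dict.empty).1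

-- ===== PRECONDITION & SPEC =====
def Spec_verify_with_one_level_of_tolerance_dp (values : List Int) (previous_value : Int) (previous_difference : Int) (remaining_tolerance : Int) (debug : Bool) (out : Bool) : Prop := out = verify_with_one_level_of_tolerance_dp_alt values previous_value previous_difference remaining_tolerance debug
instance (values : List Int) (previous_value : Int) (previous_difference : Int) (remaining_tolerance : Int) (debug : Bool) (out : Bool) : Decidable (Spec_verify_with_one_level_of_tolerance_dp values previous_value previous_difference remaining_tolerance debug out) := by unfold Spec_verify_with_one_level_of_tolerance_dp; infer_instance

-- ===== CLAIM (what is proved, stated in full; the proofs are below) =====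
def Claim_equal_verify_with_one_level_of_tolerance_dp : Prop := ∀ (values : List Int) (previous_value : Int) (previous_difference : Int) (remaining_tolerance : Int) (debug : Bool), Dom_verify_with_one_level_of_tolerance_dp values previous_value previous_difference remaining_tolerance debug → Spec_verify_with_one_level_of_tolerance_dp values previous_value previous_difference remaining_tolerance debug (verify_with_one_level_of_tolerance_dp values previous_value previous_difference remaining_tolerance debug)

-- ===== LEMMAS AND PROOFS =====

lemma pvSgn_eq_sign (d : Int) : pvSgn d = d.sign := by
  unfold pvSgn
  rcases lt_trichotomy d 0 with h | h | h
  · rw [if_neg (by omega), if_pos h, Int.sign_eq_neg_one_iff_neg.mpr h]; decide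
  · subst h; simp
  · rw [if_pos h, if_neg (by omega), Int.sign_eq_one_iff_pos.mpr h]; decide

-- A's result does not depend on debug and only on the sign of previous_difference
lemma A_sign (xs : List Int) : ∀ (pv pd pd' t : Int) (dbg dbg' : Bool), pd.sign = pd'.sign →
    verify_with_one_level_of_tolerance_dp xs pv pd t dbg = verify_with_one_level_of_tolerance_dp xs pv pd' t dbg' := by
  induction xs with
  | nil => intro pv pd pd' t dbg dbg' _; simp [verify_with_one_level_of_tolerance_dp]
  | cons v rest ih =>
    intro pv pd pd' t dbg dbg' hs
    rw [verify_with_one_level_of_tolerance_dp.eq_def, verify_with_one_level_of_tolerance_dp.eq_def]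
    have hcond : ((v - pv) * pd ≥ 0) ↔ ((v - pv) * pd' ≥ 0) := by
      rw [ge_iff_le, ge_iff_le, ← Int.sign_nonneg_iff, ← Int.sign_nonneg_iff (x := (v - pv) * pd'),
        Int.sign_mul, Int.sign_mul, hs]
    simp only [ge_iff_le] at hcond ⊢
    rw [decide_eq_decide.mpr hcond, ih pv pd pd' (t - 1) false false hs]

-- if the tolerance covers the whole remaining list, A returns True (skip everything)
lemma A_big (xs : List Int) : ∀ (pv pd t : Int) (dbg : Bool), (xs.length : Int) ≤ t →
    verify_with_one_level_of_tolerance_dp xs pv pd t dbg = true := by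
  induction xs with
  | nil =>
    intro pv pd t dbg ht
    rw [verify_with_one_level_of_tolerance_dp]
    simp at ht ⊢; omega
  | cons v rest ih =>
    intro pv pd t dbg ht
    rw [verify_with_one_level_of_tolerance_dp.eq_def]
    simp only [List.length_cons] at ht
    have h0 : ¬ t < 0 := by push_cast at ht; omega
    have hskip := ih pv pd (t - 1) false (by push_cast at ht ⊢; omega)
    simp [h0, hskip]

-- clamping the tolerance to the remaining length does not change A's value
lemma A_clamp (xs : List Int) (pv pd t : Int) (dbg : Bool) :
    verify_with_one_level_of_tolerance_dp xs pv pd t dbg =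
    verify_with_one_level_of_tolerance_dp xs pv pd (if t < (xs.length : Int) then t else (xs.length : Int)) dbg := by
  by_cases h : t < (xs.length : Int)
  · simp [h]
  · simp only [h, if_false]
    rw [A_big xs pv pd t dbg (by omega), A_big xs pv pd _ dbg (by omega)]

def MemoOK (values : List Int) (m : PySem.Dict (Nat × Int × Int × Int) Bool) : Prop :=
  ∀ i pv sd tc b, m.get? (i, pv, sd, tc) = some b →
    b = verify_with_one_level_of_tolerance_dp (values.drop i) pv sd tc false

lemma bGo_correct (values : List Int) : ∀ (k i : Nat) (pv sd t : Int) (m : PySem.Dict (Nat × Int × Int × Int) Bool),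
    values.length - i = k → MemoOK values m →
    (pvBGo values i pv sd t m).1 = verify_with_one_level_of_tolerance_dp (values.drop i) pv sd t false ∧
    MemoOK values (pvBGo values i pv sd t m).2 := by
  intro k
  induction k with
  | zero =>
    intro i pv sd t m hk hm
    have hlen : values.length ≤ i := by omega
    have hdrop : values.drop i = [] := List.drop_eq_nil_of_le hlen
    rw [pvBGo]
    by_cases ht : t < 0
    · simp [ht, hdrop, verify_with_one_level_of_tolerance_dp, hm]
    · have hi : ¬ i < values.length := by omega
      simp [ht, hi, hdrop, verify_with_one_level_of_tolerance_dp, hm]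
  | succ k ih =>
    intro i pv sd t m hk hm
    have hi : i < values.length := by omega
    rw [pvBGo]
    by_cases ht : t < 0
    · constructor
      · simp [ht]; rw [verify_with_one_level_of_tolerance_dp.eq_def]; simp [ht]
      · simpa [ht] using hm
    · simp only [ht, if_false, dif_pos hi]
      set tc : Int := if t < (values.length : Int) - i then t else (values.length : Int) - i with htc
      have hdrop : values.drop i = values[i] :: values.drop (i + 1) := List.drop_eq_getElem_cons hi
      have hlenrest : ((values.drop (i+1)).length : Int) = (values.length : Int) - i - 1 := by
        simp [List.length_drop]; omega
      -- A at tolerance t equals A at tolerance tc on the i-suffix  (and likewise one step deeper)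
      have hclamp : verify_with_one_level_of_tolerance_dp (values.drop i) pv sd t false =
          verify_with_one_level_of_tolerance_dp (values.drop i) pv sd tc false := by
        rw [A_clamp (values.drop i) pv sd t false]
        congr 1
        simp [htc, List.length_drop]
        omega
      cases hget : m.get? (i, pv, sd, tc) with
      | some b =>
        refine ⟨?_, by simpa [hget] using hm⟩
        rw [hclamp]; exact (hm i pv sd tc b hget)
      | none =>
        set d := values[i] - pv with hd
        set ok := decide (d * sd ≥ 0) && (decide (1 ≤ |d|) && decide (|d| ≤ 3)) with hok
        -- the accepting recursive call
        have hacc := ih (i + 1) values[i] (pvSgn d) tc m (by omega) hm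
        set r1 := if ok then pvBGo values (i + 1) values[i] (pvSgn d) tc m else (false, m) with hr1
        have hm1 : MemoOK values r1.2 := by
          rw [hr1]; by_cases hc : ok = true
          · simpa [hc] using hacc.2
          · simpa [hc] using hm
        have hskip := ih (i + 1) pv sd (tc - 1) r1.2 (by omega) hm1
        set r2 := if r1.1 then (true, r1.2) else pvBGo values (i + 1) pv sd (tc - 1) r1.2 with hr2
        have hm2 : MemoOK values r2.2 := by
          rw [hr2]; by_cases hc : r1.1 = true
          · simpa [hc] using hm1
          · simpa [hc] using hskip.2
        -- deeper clamp facts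
        have hclampacc : verify_with_one_level_of_tolerance_dp (values.drop (i+1)) values[i] d tc false =
            verify_with_one_level_of_tolerance_dp (values.drop (i+1)) values[i] d t false := by
          by_cases hcase : t < (values.length : Int) - i
          · simp [htc, hcase]
          · rw [A_big _ _ _ _ _ (by rw [hlenrest, htc, if_neg hcase]; try omega),
               A_big _ _ _ _ _ (by rw [hlenrest]; try omega)]
        have hclampskip : verify_with_one_level_of_tolerance_dp (values.drop (i+1)) pv sd (tc - 1) false =
            verify_with_one_level_of_tolerance_dp (values.drop (i+1)) pv sd (t - 1) false := by
          by_cases hcase : t < (values.length : Int) - i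
          · simp [htc, hcase]
          · rw [A_big _ _ _ _ _ (by rw [hlenrest, htc, if_neg hcase]; try omega),
               A_big _ _ _ _ _ (by rw [hlenrest]; try omega)]
        -- value of r1.1
        have hr1val : r1.1 = (ok && verify_with_one_level_of_tolerance_dp (values.drop (i+1)) values[i] d t false) := by
          rw [hr1]; by_cases hc : ok = true
          · rw [if_pos hc, hc, Bool.true_and]
            rw [hacc.1, A_sign _ values[i] (pvSgn d) d tc false false (by rw [pvSgn_eq_sign]; exact Int.sign_sign), hclampacc]
          · simp [hc]
        have hAi : verify_with_one_level_of_tolerance_dp (values.drop i) pv sd t false =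
            (ok && verify_with_one_level_of_tolerance_dp (values.drop (i+1)) values[i] d t false
             || verify_with_one_level_of_tolerance_dp (values.drop (i+1)) pv sd (t - 1) false) := by
          rw [hdrop, verify_with_one_level_of_tolerance_dp.eq_def]
          simp only [ht, if_false, ← hd, ← hok]
          by_cases hc : ok = true
          · by_cases hv : verify_with_one_level_of_tolerance_dp (values.drop (i+1)) values[i] d t false = true
            · simp [hc, hv]
            · simp [hc, hv]
          · simp [hc]
        have hr2val : r2.1 = verify_with_one_level_of_tolerance_dp (values.drop i) pv sd t false := by
          rw [hr2]; by_cases hc : r1.1 = true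
          · rw [if_pos hc]
            rw [hAi]
            rw [hr1val] at hc
            simp [hc]
          · rw [if_neg hc]
            simp only [Bool.not_eq_true] at hc
            rw [hskip.1, hclampskip, hAi]
            rw [hr1val] at hc
            simp [hc]
        refine ⟨hr2val, ?_⟩
        intro i' pv' sd' tc' b' hb'
        rw [PySem.Dict.get?_insert] at hb'
        by_cases hkey : (i', pv', sd', tc') = (i, pv, sd, tc)
        · rw [if_pos hkey] at hb'
          injection hb' with hb'
          simp only [Prod.mk.injEq] at hkey
          obtain ⟨e1, e2, e3, e4⟩ := hkey
          subst e1; subst e2; subst e3; subst e4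
          rw [← hb', hr2val, hclamp]
        · rw [if_neg hkey] at hb'
          exact hm2 i' pv' sd' tc' b' hb'

-- ===== VERDICT (by name: the statement is the Claim_ definition above) =====
theorem verify_with_one_level_of_tolerance_dp_spec : Claim_equal_verify_with_one_level_of_tolerance_dp := by
  intro values pv pd t dbg _
  unfold Spec_verify_with_one_level_of_tolerance_dp verify_with_one_level_of_tolerance_dp_alt
  have hempty : MemoOK values PySem.Dict.empty := by
    intro i pv' sd tc b hb
    simp [PySem.Dict.get?_empty] at hb
  have h := (bGo_correct values (values.length - 0) 0 pv (pvSgn pd) t PySem.Dict.empty rfl hempty).1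
  rw [h]
  simp only [List.drop_zero]
  exact A_sign values pv pd (pvSgn pd) t dbg false (by rw [pvSgn_eq_sign]; exact Int.sign_sign.symm)
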